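-- pv_equiv track=rewrite | github.com/hmcts/civil-service | scripts/generate_email_notifications_table.py | template_links_for_scenarios
-- ===== SOURCE A (Python) =====
-- from typing import Dict, List, Optional, Set
--
-- def template_links_for_scenarios(scenarios: Set[str], template_map: Dict[str, Dict[str, str]]) -> List[Dict[str, str]]:
--     if not scenarios:
--         return []
--     links = []
--     for scenario in sorted(filter(None, scenarios)):
--         if not scenario.startswith('Scenario.'):
--             continue
--         template_name = 'Notice.' + scenario.split('Scenario.', 1)[1]
--         template_entry = template_map.get(template_name)
--         if template_entry:
--             links.append({
--                 'label': template_name,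
--                 'path': template_entry['path'],
--                 'preview': template_entry['content']
--             })
--     if not links:
--         links.append({'label': 'No template — task list only'})
--     return links
-- ===== SOURCE B (Python) =====
-- from typing import Dict, List, Set
--
-- def template_links_for_scenarios(scenarios: Set[str], template_map: Dict[str, Dict[str, str]]) -> List[Dict[str, str]]:
--     if not scenarios:
--         return []
--     # Invert the iteration: walk the template map instead of the scenarios.
--     wanted = {s[len('Scenario.'):] for s in scenarios if s.startswith('Scenario.')}
--     links = [{'label': name, 'path': entry['path'], 'preview': entry['content']}
--              for name, entry in template_map.items()
--              if entry and name.startswith('Notice.') and name[len('Notice.'):] in wanted]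
--     links.sort(key=lambda d: d['label'])
--     return links or [{'label': 'No template — task list only'}]
-- ===== Notes on version B (the rewrite author's own statement) =====
-- stated objective: alternative
-- what changed: B inverts the traversal: instead of sorting the scenarios and doing one dict lookup per scenario, it builds a set of wanted suffixes from the scenarios, makes a single pass over template_map testing set membership, and sorts the resulting link list by label.
import Mathlib
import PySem

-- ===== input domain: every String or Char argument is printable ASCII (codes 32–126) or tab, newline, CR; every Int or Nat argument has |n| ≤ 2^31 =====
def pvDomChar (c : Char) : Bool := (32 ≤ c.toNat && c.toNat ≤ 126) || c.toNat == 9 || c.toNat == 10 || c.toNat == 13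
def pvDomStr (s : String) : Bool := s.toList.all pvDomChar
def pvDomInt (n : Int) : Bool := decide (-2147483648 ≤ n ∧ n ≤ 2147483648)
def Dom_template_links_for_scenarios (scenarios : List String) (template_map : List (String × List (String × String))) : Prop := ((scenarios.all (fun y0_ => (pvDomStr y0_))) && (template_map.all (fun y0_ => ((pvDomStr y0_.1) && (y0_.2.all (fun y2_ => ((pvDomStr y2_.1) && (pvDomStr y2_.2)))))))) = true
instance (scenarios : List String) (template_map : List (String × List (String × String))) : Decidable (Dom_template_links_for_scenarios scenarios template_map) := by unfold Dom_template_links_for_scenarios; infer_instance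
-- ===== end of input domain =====

-- B inverts the traversal: it builds a set of wanted scenario suffixes, walks template_map
-- once testing membership in that set, and sorts the collected links by label; A sorts the
-- scenarios and does one dict lookup per scenario. Objective: alternative.

-- dict.get / d[k] on an association list: first match (shared transliteration of Python dict lookup)
def dget {ν : Type} (d : List (String × ν)) (k : String) : Option ν :=
  match d with
  | [] => none
  | (k', v) :: rest => if k' == k then some v else dget rest k

-- ===== PORT A =====
-- entry['path'] / entry['content'] are ported as (dget …).getD ""; exact on Pre_, which
-- requires those keys to be present (Python raises KeyError otherwise).
def template_links_for_scenarios (scenarios : List String) (template_map : List (String × List (String × String))) : List (List (String × String)) :=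
  if scenarios = [] then []
  else
    let links := (PySem.List.sorted (scenarios.filter (fun s => s ≠ "")) (fun s => s) false).foldl
      (fun links scenario =>
        if ¬ PySem.Str.startswith scenario "Scenario." then links
        else
          let template_name := "Notice." ++ ((PySem.List.pyGet? ((PySem.Str.splitMax? scenario "Scenario." 1).getD []) 1).getD "")
          match dget template_map template_name with
          | some template_entry =>
              if template_entry ≠ [] then
                links ++ [[("label", template_name),
                           ("path", (dget template_entry "path").getD ""),
                           ("preview", (dget template_entry "content").getD "")]]
              else links
          | none => links) []
    if links = [] then [[("label", "No template — task list only")]] else links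

-- ===== PORT B =====
-- B's set comprehension: {s[len('Scenario.'):] for s in scenarios if s.startswith('Scenario.')}
def wantedOf (scenarios : List String) : PySem.Set String :=
  scenarios.foldl
    (fun acc s => if PySem.Str.startswith s "Scenario." then PySem.Set.add acc (PySem.Str.slice s (some 9) none) else acc) []

-- body of B's list comprehension over template_map.items(): one (name, entry) item → its
-- optional link dict (getD "" exact on Pre_ as in A)
def noticeLink (wanted : PySem.Set String) (kv : String × List (String × String)) : Option (List (String × String)) :=
  if kv.2 ≠ [] ∧ PySem.Str.startswith kv.1 "Notice." = true ∧
       PySem.Set.contains wanted (PySem.Str.slice kv.1 (some 7) none) = true then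
    some [("label", kv.1),
          ("path", (dget kv.2 "path").getD ""),
          ("preview", (dget kv.2 "content").getD "")]
  else none

def template_links_for_scenarios_alt (scenarios : List String) (template_map : List (String × List (String × String))) : List (List (String × String)) :=
  if scenarios = [] then []
  else
    let wanted : PySem.Set String := wantedOf scenarios
    let links := template_map.filterMap (noticeLink wanted)
    let sortedLinks := PySem.List.sorted links (fun d => (dget d "label").getD "") false
    if sortedLinks = [] then [[("label", "No template — task list only")]] else sortedLinks

-- ===== PRECONDITION & SPEC =====
-- Pre_ excludes (a) lists with duplicate scenarios and association lists with duplicate keys —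
-- 'scenarios' is a Python set and 'template_map' a Python dict, so their List ports hold
-- distinct elements / distinct keys — and (b) inputs on which Python A raises KeyError: a used
-- non-empty template_map entry that lacks the 'path' or 'content' key.
def Pre_template_links_for_scenarios (scenarios : List String) (template_map : List (String × List (String × String))) : Prop :=
  scenarios.Nodup ∧ (template_map.map Prod.fst).Nodup ∧
  ∀ s ∈ scenarios, PySem.Str.startswith s "Scenario." = true →
    ∀ p ∈ template_map, p.1 = "Notice." ++ PySem.Str.slice s (some 9) none →
      p.2 ≠ [] → ("path" ∈ p.2.map Prod.fst ∧ "content" ∈ p.2.map Prod.fst)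
instance (scenarios : List String) (template_map : List (String × List (String × String))) : Decidable (Pre_template_links_for_scenarios scenarios template_map) := by unfold Pre_template_links_for_scenarios; infer_instance

def pvWitness_template_links_for_scenarios : List String × (List (String × List (String × String))) :=
  (["Scenario.b", "Scenario.a", "x"], [("Notice.a", [("path", "pa"), ("content", "ca")]), ("Notice.b", [("path", "pb"), ("content", "cb")])])

def Spec_template_links_for_scenarios (scenarios : List String) (template_map : List (String × List (String × String))) (out : List (List (String × String))) : Prop := out = template_links_for_scenarios_alt scenarios template_map
instance (scenarios : List String) (template_map : List (String × List (String × String))) (out : List (List (String × String))) : Decidable (Spec_template_links_for_scenarios scenarios template_map out) := by unfold Spec_template_links_for_scenarios; infer_instance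

-- ===== CLAIM (what is proved, stated in full; the proofs are below) =====
def Claim_equal_template_links_for_scenarios : Prop := ∀ (scenarios : List String) (template_map : List (String × List (String × String))), Dom_template_links_for_scenarios scenarios template_map → Pre_template_links_for_scenarios scenarios template_map → Spec_template_links_for_scenarios scenarios template_map (template_links_for_scenarios scenarios template_map)

-- ===== LEMMAS AND PROOFS =====

-- proof-only abstraction of A's loop body: one scenario → its optional link dict
def aLink (tm : List (String × List (String × String))) (scenario : String) : Option (List (String × String)) :=
  if PySem.Str.startswith scenario "Scenario." then
    match dget tm ("Notice." ++ PySem.Str.slice scenario (some 9) none) with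
    | some entry =>
        if entry ≠ [] then
          some [("label", "Notice." ++ PySem.Str.slice scenario (some 9) none),
                ("path", (dget entry "path").getD ""),
                ("preview", (dget entry "content").getD "")]
        else none
    | none => none
  else none

-- splitOnMax.go with maxsplit budget 0 just closes the current piece
theorem go_msplit_zero (sep : List Char) (fuel : Nat) (l cur : List Char) (acc : List (List Char)) :
    PySem.Chars.splitOnMax.go sep fuel 0 l cur acc = ((cur.reverse ++ l) :: acc).reverse := by
  cases fuel <;> cases l <;> simp [PySem.Chars.splitOnMax.go]

-- one step of splitOnMax.go when the separator is a prefix and one split remains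
theorem go_step_one (sep : List Char) (fuel : Nat) (l cur : List Char) (acc : List (List Char))
    (hp : sep.isPrefixOf l = true) (hne : l ≠ []) :
    PySem.Chars.splitOnMax.go sep (Nat.succ fuel) 1 l cur acc
      = PySem.Chars.splitOnMax.go sep fuel 0 (l.drop sep.length) [] (cur.reverse :: acc) := by
  cases l with
  | nil => exact absurd rfl hne
  | cons c rest => simp [PySem.Chars.splitOnMax.go, hp]

-- s.split('Scenario.', 1)[1] = s[9:] when s starts with 'Scenario.'
theorem splitMax_prefix (s : String) (h : PySem.Str.startswith s "Scenario." = true) :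
    PySem.Str.splitMax? s "Scenario." 1 = some ["", String.ofList (s.toList.drop 9)] := by
  obtain ⟨t, ht⟩ : "Scenario.".toList <+: s.toList := by
    simpa [PySem.Chars.startswith_iff] using h
  have hdrop : s.toList.drop 9 = t := by rw [← ht]; simp
  have hpre : ("Scenario.".toList).isPrefixOf s.toList = true := by
    simpa [List.isPrefixOf_iff_prefix] using ⟨t, ht⟩
  have hne : s.toList ≠ [] := by rw [← ht]; simp
  rw [PySem.Str.splitMax?, PySem.Chars.splitMax?, PySem.Chars.splitOnMax]
  have hfuel : (s.toList.length + 1) = Nat.succ (t.length + 9) := by rw [← ht]; simp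
  norm_num [hfuel]
  rw [go_step_one _ _ _ _ _ hpre hne, go_msplit_zero]
  simp [hdrop]

-- s[n:] as a drop on code points (the two instances the ports use)
theorem slice_nine (s : String) :
    PySem.Str.slice s (some 9) none = String.ofList (s.toList.drop 9) := by
  have h : (PySem.Str.slice s (some 9) none).toList = s.toList.drop 9 := by
    rw [PySem.Str.toList_slice]
    simpa using PySem.List.slice_from_natCast s.toList 9
  calc PySem.Str.slice s (some 9) none
      = String.ofList ((PySem.Str.slice s (some 9) none).toList) := (String.ofList_toList).symm
    _ = String.ofList (s.toList.drop 9) := by rw [h]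

theorem slice_seven (s : String) :
    PySem.Str.slice s (some 7) none = String.ofList (s.toList.drop 7) := by
  have h : (PySem.Str.slice s (some 7) none).toList = s.toList.drop 7 := by
    rw [PySem.Str.toList_slice]
    simpa using PySem.List.slice_from_natCast s.toList 7
  calc PySem.Str.slice s (some 7) none
      = String.ofList ((PySem.Str.slice s (some 7) none).toList) := (String.ofList_toList).symm
    _ = String.ofList (s.toList.drop 7) := by rw [h]

-- A's loop body is aLink
theorem bodyA_eq_aLink (tm : List (String × List (String × String))) (acc : List (List (String × String))) (s : String) :
    (if ¬ PySem.Str.startswith s "Scenario." then acc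
     else
       let template_name := "Notice." ++ ((PySem.List.pyGet? ((PySem.Str.splitMax? s "Scenario." 1).getD []) 1).getD "")
       match dget tm template_name with
       | some template_entry =>
           if template_entry ≠ [] then
             acc ++ [[("label", template_name),
                      ("path", (dget template_entry "path").getD ""),
                      ("preview", (dget template_entry "content").getD "")]]
           else acc
       | none => acc)
    = match aLink tm s with | some d => acc ++ [d] | none => acc := by
  by_cases hs : PySem.Str.startswith s "Scenario." = true
  · rw [if_neg (not_not_intro hs)]
    rw [splitMax_prefix s hs]
    unfold aLink
    rw [if_pos hs, slice_nine]
    have hname : ((PySem.List.pyGet? (["", String.ofList (s.toList.drop 9)] : List String) 1).getD "")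
        = String.ofList (s.toList.drop 9) := by
      simp [PySem.List.pyGet?, PySem.List.pyIdx?]
    simp only [Option.getD_some, hname]
    cases hdg : dget tm ("Notice." ++ String.ofList (s.toList.drop 9)) with
    | none => simp
    | some entry => by_cases he : entry = [] <;> simp [he]
  · rw [if_pos hs]
    unfold aLink
    rw [if_neg hs]

-- A's whole loop is a filterMap of aLink over the sorted list
theorem foldlA_eq_filterMap (tm : List (String × List (String × String))) (l : List String) (acc : List (List (String × String))) :
    l.foldl
      (fun links scenario =>
        if ¬ PySem.Str.startswith scenario "Scenario." then links
        else
          let template_name := "Notice." ++ ((PySem.List.pyGet? ((PySem.Str.splitMax? scenario "Scenario." 1).getD []) 1).getD "")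
          match dget tm template_name with
          | some template_entry =>
              if template_entry ≠ [] then
                links ++ [[("label", template_name),
                           ("path", (dget template_entry "path").getD ""),
                           ("preview", (dget template_entry "content").getD "")]]
              else links
          | none => links) acc
      = acc ++ l.filterMap (aLink tm) := by
  induction l generalizing acc with
  | nil => simp
  | cons x t ih =>
      rw [List.foldl_cons, bodyA_eq_aLink tm acc x]
      cases hx : aLink tm x with
      | none => simp only; rw [ih]; simp [hx]
      | some d => simp only; rw [ih]; simp [hx]

-- a filter whose rejects are filterMap-invisible can be dropped
theorem filterMap_filter_none {α β : Type} (p : α → Bool) (g : α → Option β) (l : List α)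
    (h : ∀ s, p s = false → g s = none) :
    (l.filter p).filterMap g = l.filterMap g := by
  induction l with
  | nil => rfl
  | cons x t ih =>
      cases hp : p x with
      | false => simp [hp, h x hp, ih]
      | true => simp [hp, List.filterMap_cons, ih]

-- the empty string never yields a link, so A's filter(None, …) is invisible to filterMap
theorem aLink_empty (tm : List (String × List (String × String))) : aLink tm "" = none := by
  unfold aLink
  rw [if_neg (by decide : ¬ PySem.Str.startswith "" "Scenario." = true)]

-- appending a common prefix preserves/reflects lexicographic order
theorem append_lt_append_left (p u v : List Char) : p ++ u < p ++ v ↔ u < v := by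
  induction p with
  | nil => simp
  | cons c t ih => simpa [List.cons_lt_cons_self] using ih

-- string-append left cancellation
theorem string_append_left_cancel (p u v : String) (h : p ++ u = p ++ v) : u = v := by
  have := congrArg String.toList h
  simp only [String.toList_append, List.append_cancel_left_eq] at this
  calc u = String.ofList u.toList := (String.ofList_toList).symm
    _ = String.ofList v.toList := by rw [this]
    _ = v := String.ofList_toList

-- a string starting with a prefix is the prefix plus its own tail
theorem startswith_recon (s p : String) (h : PySem.Str.startswith s p = true) :
    s = p ++ String.ofList (s.toList.drop p.toList.length) := by
  obtain ⟨t, ht⟩ : p.toList <+: s.toList := by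
    simpa [PySem.Chars.startswith_iff] using h
  have hdrop : String.ofList (s.toList.drop p.toList.length) = String.ofList t := by
    rw [← ht]; simp
  rw [hdrop]
  calc s = String.ofList s.toList := (String.ofList_toList).symm
    _ = String.ofList (p.toList ++ (String.ofList t).toList) := by rw [← ht]; simp
    _ = String.ofList ((p ++ String.ofList t).toList) := by rw [String.toList_append]
    _ = p ++ String.ofList t := String.ofList_toList

-- a prefix-plus-tail string starts with the prefix
theorem startswith_append (p t : String) : PySem.Str.startswith (p ++ t) p = true := by
  rw [show (PySem.Str.startswith (p ++ t) p = true) ↔ p.toList <+: (p ++ t).toList from by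
        simp [PySem.Chars.startswith_iff]]
  exact ⟨t.toList, by simp⟩

-- aLink's label is 'Notice.' + suffix
theorem aLink_label (tm : List (String × List (String × String))) (s : String) (d : List (String × String))
    (h : aLink tm s = some d) :
    PySem.Str.startswith s "Scenario." = true ∧
      (dget d "label").getD "" = "Notice." ++ PySem.Str.slice s (some 9) none := by
  unfold aLink at h
  by_cases hs : PySem.Str.startswith s "Scenario." = true
  · rw [if_pos hs] at h
    simp only [ne_eq] at h
    refine ⟨hs, ?_⟩
    cases hdg : dget tm ("Notice." ++ PySem.Str.slice s (some 9) none) with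
    | none => rw [hdg] at h; exact absurd h (by simp)
    | some entry =>
        rw [hdg] at h
        by_cases he : entry = []
        · simp [he] at h
        · simp [he] at h
          subst h
          simp [dget]
  · rw [if_neg hs] at h; exact absurd h (by simp)

-- noticeLink's label is the map key
theorem noticeLink_label (w : PySem.Set String) (kv : String × List (String × String)) (d : List (String × String))
    (h : noticeLink w kv = some d) : (dget d "label").getD "" = kv.1 := by
  unfold noticeLink at h
  split_ifs at h with hc
  · rw [← Option.some.inj h]
    simp [dget]

theorem label_lt_of_lt (a b : String)
    (ha : PySem.Str.startswith a "Scenario." = true)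
    (hb : PySem.Str.startswith b "Scenario." = true)
    (hab : a < b) :
    ("Notice." ++ PySem.Str.slice a (some 9) none : String) < "Notice." ++ PySem.Str.slice b (some 9) none := by
  obtain ⟨u, hu⟩ : "Scenario.".toList <+: a.toList := by
    simpa [PySem.Chars.startswith_iff] using ha
  obtain ⟨v, hv⟩ : "Scenario.".toList <+: b.toList := by
    simpa [PySem.Chars.startswith_iff] using hb
  have hu9 : a.toList.drop 9 = u := by rw [← hu]; simp
  have hv9 : b.toList.drop 9 = v := by rw [← hv]; simp
  have huv : u < v := by
    rw [String.lt_iff_toList_lt, ← hu, ← hv, append_lt_append_left] at hab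
    exact hab
  rw [String.lt_iff_toList_lt]
  simp only [String.toList_append, slice_nine, String.toList_ofList, hu9, hv9]
  rw [append_lt_append_left]
  exact huv

-- first-match lookup in a key-Nodup association list IS membership
theorem dget_eq_some_iff {ν : Type} (tm : List (String × ν)) (k : String) (v : ν)
    (hk : (tm.map Prod.fst).Nodup) : dget tm k = some v ↔ (k, v) ∈ tm := by
  induction tm with
  | nil => simp [dget]
  | cons p rest ih =>
      obtain ⟨k', v'⟩ := p
      simp only [List.map_cons, List.nodup_cons] at hk
      by_cases hkk : k' = k
      · subst hkk
        simp only [dget, beq_self_eq_true, if_pos]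
        constructor
        · intro h
          have hv : v' = v := Option.some.inj h
          subst hv
          exact List.mem_cons_self
        · intro h
          rcases List.mem_cons.mp h with h1 | h1
          · simp [Prod.ext_iff] at h1; simp [h1]
          · exact absurd (List.mem_map.mpr ⟨(k', v), h1, rfl⟩) hk.1
      · simp only [dget, show (k' == k) = false from beq_eq_false_iff_ne.mpr hkk, if_neg Bool.false_ne_true]
        rw [ih hk.2]
        simp [List.mem_cons, Prod.ext_iff, Ne.symm hkk]
  
-- membership in B's wanted-set fold
theorem mem_wanted (scenarios : List String) (acc : PySem.Set String) (x : String) :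
    x ∈ scenarios.foldl
      (fun acc s => if PySem.Str.startswith s "Scenario." then PySem.Set.add acc (PySem.Str.slice s (some 9) none) else acc) acc
    ↔ x ∈ acc ∨ ∃ s ∈ scenarios, PySem.Str.startswith s "Scenario." = true ∧ PySem.Str.slice s (some 9) none = x := by
  induction scenarios generalizing acc with
  | nil => simp
  | cons a t ih =>
      simp only [List.foldl_cons]
      by_cases ha : PySem.Str.startswith a "Scenario." = true
      · rw [if_pos ha, ih]
        simp only [PySem.Set.mem_add, List.mem_cons]
        constructor
        · rintro (⟨h | h⟩ | ⟨s, hs, h1, h2⟩)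
          · exact Or.inl h
          · exact Or.inr ⟨a, Or.inl rfl, ha, h.symm⟩
          · exact Or.inr ⟨s, Or.inr hs, h1, h2⟩
        · rintro (h | ⟨s, hs | hs, h1, h2⟩)
          · exact Or.inl (Or.inl h)
          · subst hs; exact Or.inl (Or.inr h2.symm)
          · exact Or.inr ⟨s, hs, h1, h2⟩
      · rw [if_neg ha, ih]
        simp only [List.mem_cons]
        constructor
        · rintro (h | ⟨s, hs, h1, h2⟩)
          · exact Or.inl h
          · exact Or.inr ⟨s, Or.inr hs, h1, h2⟩
        · rintro (h | ⟨s, hs | hs, h1, h2⟩)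
          · exact Or.inl h
          · subst hs; exact absurd h1 ha
          · exact Or.inr ⟨s, hs, h1, h2⟩


-- two scenarios with the same link are equal
theorem aLink_inj (tm : List (String × List (String × String))) (s s' : String) (d : List (String × String))
    (h : aLink tm s = some d) (h' : aLink tm s' = some d) : s = s' := by
  obtain ⟨hs, hl⟩ := aLink_label tm s d h
  obtain ⟨hs', hl'⟩ := aLink_label tm s' d h'
  have heq : PySem.Str.slice s (some 9) none = PySem.Str.slice s' (some 9) none :=
    string_append_left_cancel "Notice." _ _ (hl.symm.trans hl')
  have h1 := startswith_recon s "Scenario." hs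
  have h2 := startswith_recon s' "Scenario." hs'
  rw [show ("Scenario." : String).toList.length = 9 from rfl] at h1 h2
  rw [slice_nine, slice_nine] at heq
  rw [h1, h2, heq]

-- A's link list has no duplicates
theorem nodupA (tm : List (String × List (String × String))) (scenarios : List String)
    (h : scenarios.Nodup) : (scenarios.filterMap (aLink tm)).Nodup :=
  h.filterMap (fun a a' b ha ha' => aLink_inj tm a a' b ha ha')

-- B's link list has no duplicates (distinct keys give distinct labels)
theorem nodupB (w : PySem.Set String) (tm : List (String × List (String × String)))
    (hk : (tm.map Prod.fst).Nodup) : (tm.filterMap (noticeLink w)).Nodup := by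
  have hp : tm.Pairwise (fun a b => a.1 ≠ b.1) := List.pairwise_map.mp hk
  rw [List.Nodup, List.pairwise_filterMap]
  refine hp.imp ?_
  intro a b hab d hd d' hd' hdd
  apply hab
  rw [← noticeLink_label w a d hd, ← noticeLink_label w b d' hd', hdd]

-- the core correspondence: A's per-scenario links and B's per-item links have the same members
theorem memAB (scenarios : List String) (tm : List (String × List (String × String)))
    (hk : (tm.map Prod.fst).Nodup) (d : List (String × String)) :
    d ∈ scenarios.filterMap (aLink tm) ↔ d ∈ tm.filterMap (noticeLink (wantedOf scenarios)) := by
  simp only [List.mem_filterMap]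
  constructor
  · rintro ⟨s, hs, h⟩
    unfold aLink at h
    by_cases hsw : PySem.Str.startswith s "Scenario." = true
    · rw [if_pos hsw] at h
      simp only [ne_eq] at h
      cases hdg : dget tm ("Notice." ++ PySem.Str.slice s (some 9) none) with
      | none => rw [hdg] at h; exact absurd h (by simp)
      | some v =>
          rw [hdg] at h
          by_cases hv : v = []
          · simp [hv] at h
          · simp only [] at h
            rw [if_pos hv] at h
            refine ⟨("Notice." ++ PySem.Str.slice s (some 9) none, v),
              (dget_eq_some_iff tm _ v hk).mp hdg, ?_⟩
            have hslice : PySem.Str.slice ("Notice." ++ PySem.Str.slice s (some 9) none) (some 7) none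
                = PySem.Str.slice s (some 9) none := by
              rw [slice_seven]
              have hdrop : (("Notice." ++ PySem.Str.slice s (some 9) none)).toList.drop 7
                  = (PySem.Str.slice s (some 9) none).toList := by
                rw [String.toList_append]
                rw [show (7 : Nat) = ("Notice." : String).toList.length from rfl]
                exact List.drop_left
              rw [hdrop, String.ofList_toList]
            have hcont : PySem.Set.contains (wantedOf scenarios)
                (PySem.Str.slice ("Notice." ++ PySem.Str.slice s (some 9) none) (some 7) none) = true := by
              rw [hslice, PySem.Set.contains_iff]
              exact (mem_wanted scenarios [] _).mpr (Or.inr ⟨s, hs, hsw, rfl⟩)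
            unfold noticeLink
            rw [if_pos ⟨hv, startswith_append "Notice." _, hcont⟩]
            exact h
    · rw [if_neg hsw] at h; exact absurd h (by simp)
  · rintro ⟨kv, hkv, h⟩
    unfold noticeLink at h
    split_ifs at h with hc
    · obtain ⟨hv, hsw, hcont⟩ := hc
      rw [PySem.Set.contains_iff] at hcont
      obtain ⟨s, hs, hssw, hsl⟩ := (mem_wanted scenarios [] _).mp hcont |>.resolve_left (by simp)
      have hk1 : kv.1 = "Notice." ++ PySem.Str.slice kv.1 (some 7) none := by
        rw [slice_seven]
        have := startswith_recon kv.1 "Notice." hsw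
        rw [show ("Notice." : String).toList.length = 7 from rfl] at this
        exact this
      refine ⟨s, hs, ?_⟩
      unfold aLink
      rw [if_pos hssw]
      have hname : "Notice." ++ PySem.Str.slice s (some 9) none = kv.1 := by
        rw [hsl, ← hk1]
      have hdg : dget tm kv.1 = some kv.2 :=
        (dget_eq_some_iff tm kv.1 kv.2 hk).mpr (by simpa using hkv)
      rw [hname, hdg]
      simpa [hv] using h
-- ===== VERDICT (by name: the statement is the Claim_ definition above) =====
theorem template_links_for_scenarios_spec : Claim_equal_template_links_for_scenarios := by
  intro scenarios tm _ hPre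
  obtain ⟨hnd, hkeys, _⟩ := hPre
  unfold Spec_template_links_for_scenarios
  unfold template_links_for_scenarios template_links_for_scenarios_alt
  by_cases hnil : scenarios = []
  · simp [hnil]
  · rw [if_neg hnil, if_neg hnil]
    rw [foldlA_eq_filterMap]
    simp only [List.nil_append]
    have key :
        PySem.List.sorted (tm.filterMap (noticeLink (wantedOf scenarios))) (fun d => (dget d "label").getD "") false
          = (PySem.List.sorted (scenarios.filter (fun s => s ≠ "")) (fun s => s) false).filterMap (aLink tm) := by
      apply PySem.List.sorted_eq_of_perm_of_pairwise_lt
      · have p1 : ((PySem.List.sorted (scenarios.filter (fun s => s ≠ "")) (fun s => s) false).filterMap (aLink tm)).Perm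
            (scenarios.filterMap (aLink tm)) :=
          ((PySem.List.sorted_perm _ _ _).filterMap (aLink tm)).trans
            (by rw [filterMap_filter_none _ _ _ (fun s hs => by
                  have : s = "" := by simpa using hs
                  rw [this, aLink_empty])])
        have p2 : (scenarios.filterMap (aLink tm)).Perm (tm.filterMap (noticeLink (wantedOf scenarios))) :=
          (List.perm_ext_iff_of_nodup (nodupA tm scenarios hnd) (nodupB _ tm hkeys)).mpr (memAB scenarios tm hkeys)
        exact p1.trans p2
      · have hle : (PySem.List.sorted (scenarios.filter (fun s => s ≠ "")) (fun s => s) false).Pairwise (· ≤ ·) :=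
          PySem.List.sorted_pairwise _ _
        have hndup : (PySem.List.sorted (scenarios.filter (fun s => s ≠ "")) (fun s => s) false).Nodup :=
          ((PySem.List.sorted_perm _ _ _)).nodup_iff.mpr (hnd.filter _)
        have hlt : (PySem.List.sorted (scenarios.filter (fun s => s ≠ "")) (fun s => s) false).Pairwise (· < ·) :=
          (hle.and hndup).imp (fun h => lt_of_le_of_ne h.1 h.2)
        rw [List.pairwise_filterMap]
        refine hlt.imp ?_
        intro a b hab d hd d' hd'
        obtain ⟨ha, hla⟩ := aLink_label tm a d hd
        obtain ⟨hb, hlb⟩ := aLink_label tm b d' hd'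
        rw [hla, hlb]
        exact label_lt_of_lt a b ha hb hab
    rw [key]
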